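-- pv_equiv track=rewrite | github.com/fadkeabhi/GFG-POTD | 2023/MAR/5.py | avoidExlosion
-- ===== SOURCE A (Python) =====
-- def avoidExlosion(mix, n, danger, m):
--
--     arr = [i for i in range(n+1)]
--     def union(i, j):
--         r1, r2 = find(i), find(j)
--         if r1 != r2:
--             arr[r1] = r2
--         return r2
--     def find(i):
--         while i != arr[i]:
--             i = arr[i]
--         return i
--
--
--     ans = []
--     for x, y in mix:
--         rx, ry = find(x), find(y)
--         for p, q in danger:
--             rp, rq = find(p), find(q)
--             if (rx, ry) == (rp, rq) or (rx, ry) == (rq, rp):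
--                 ans.append("No")
--                 break
--         else:
--             union(rx, ry)
--             ans.append("Yes")
--     return ans
-- ===== SOURCE B (Python) =====
-- def avoidExlosion(mix, n, danger, m):
--     # Eager component labels: comp[v] is the root of v's group (no find chains),
--     # and a set of the current forbidden root pairs, recomputed only on unions.
--     comp = list(range(n + 1))
--     pairs = {(comp[p], comp[q]) for p, q in danger}
--     ans = []
--     for x, y in mix:
--         rx, ry = comp[x], comp[y]
--         if (rx, ry) in pairs or (ry, rx) in pairs:
--             ans.append("No")
--         else:
--             ans.append("Yes")
--             if rx != ry:
--                 comp = [ry if c == rx else c for c in comp]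
--                 pairs = {(comp[p], comp[q]) for p, q in danger}
--     return ans
-- ===== Notes on version B (the rewrite author's own statement) =====
-- stated objective: alternative
-- what changed: A re-scans all of danger on every mix entry, running union-find root chains for each danger endpoint; B keeps eager component labels (comp[v] is v's root, relabelled on union) and a set of the current forbidden root pairs, so each mix step is a set lookup and work on danger happens only when a union occurs.
-- outside the precondition, e.g. on avoidExlosion([], 0, [(5, 5)], 1): A returns [], B raises IndexError; on avoidExlosion([(0, 0)], 0, [(0, 0), (7, 7)], 2): A returns ['No'], B raises IndexError
import Mathlib
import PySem

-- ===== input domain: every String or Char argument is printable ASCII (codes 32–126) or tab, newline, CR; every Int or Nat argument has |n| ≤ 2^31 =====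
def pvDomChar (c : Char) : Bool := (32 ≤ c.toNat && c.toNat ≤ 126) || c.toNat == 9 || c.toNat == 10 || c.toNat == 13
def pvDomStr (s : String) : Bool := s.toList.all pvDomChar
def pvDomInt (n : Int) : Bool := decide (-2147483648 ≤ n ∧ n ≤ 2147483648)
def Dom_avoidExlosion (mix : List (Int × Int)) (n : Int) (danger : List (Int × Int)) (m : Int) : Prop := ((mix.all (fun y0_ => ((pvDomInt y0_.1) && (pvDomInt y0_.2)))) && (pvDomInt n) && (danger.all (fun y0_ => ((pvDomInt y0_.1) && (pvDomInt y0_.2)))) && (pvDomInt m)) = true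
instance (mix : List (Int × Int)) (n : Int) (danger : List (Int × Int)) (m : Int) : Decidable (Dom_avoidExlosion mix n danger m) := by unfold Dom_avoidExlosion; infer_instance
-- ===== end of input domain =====

-- B replaces A's per-mix rescan of danger (with union-find chains) by eager component
-- labels plus a set of current forbidden root pairs, recomputed only when a union happens
-- (objective: alternative — a different algorithm of comparable cost).
-- ===== PORT A =====

-- arr[i] (Python indexing, possibly negative); Pre_ keeps every used index valid, so the default is unreachable
def pyG (xs : List Int) (i : Int) : Int := PySem.List.pyGetD xs i 0

-- `while i != arr[i]: i = arr[i]; return i`, fuel-bounded (fuel = len(arr) suffices on Pre_)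
def findA (arr : List Int) : Nat → Int → Int
  | 0, i => i
  | f + 1, i =>
      let ai := pyG arr i
      if i ≠ ai then findA arr f ai else i

-- `def union(i, j)` (the returned r2 is discarded by A's caller)
def unionA (arr : List Int) (i j : Int) : List Int :=
  let r1 := findA arr arr.length i
  let r2 := findA arr arr.length j
  if r1 ≠ r2 then PySem.List.pySetD arr r1 r2 else arr

-- the inner `for p, q in danger: … break` loop: true iff it breaks with "No"
def checkA (arr : List Int) (rx ry : Int) : List (Int × Int) → Bool
  | [] => false
  | (p, q) :: rest =>
      let rp := findA arr arr.length p
      let rq := findA arr arr.length q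
      if (rx = rp ∧ ry = rq) ∨ (rx = rq ∧ ry = rp) then true
      else checkA arr rx ry rest

def loopA (danger : List (Int × Int)) : List (Int × Int) → List Int → List String → List String
  | [], _, ans => ans
  | (x, y) :: rest, arr, ans =>
      let rx := findA arr arr.length x
      let ry := findA arr arr.length y
      if checkA arr rx ry danger then loopA danger rest arr (ans ++ ["No"])
      else loopA danger rest (unionA arr rx ry) (ans ++ ["Yes"])

def avoidExlosion (mix : List (Int × Int)) (n : Int) (danger : List (Int × Int)) (m : Int) : List String :=
  loopA danger mix (PySem.List.pyRange 0 (n + 1) 1) []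

-- ===== PORT B =====

-- `{(comp[p], comp[q]) for p, q in danger}`
def mkPairsB (comp : List Int) (danger : List (Int × Int)) : PySem.Set (Int × Int) :=
  PySem.Set.ofList (danger.map (fun pq => (pyG comp pq.1, pyG comp pq.2)))

def loopB (danger : List (Int × Int)) : List (Int × Int) → List Int → PySem.Set (Int × Int) → List String → List String
  | [], _, _, ans => ans
  | (x, y) :: rest, comp, pairs, ans =>
      let rx := pyG comp x
      let ry := pyG comp y
      if PySem.Set.contains pairs (rx, ry) || PySem.Set.contains pairs (ry, rx) then
        loopB danger rest comp pairs (ans ++ ["No"])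
      else
        if rx ≠ ry then
          let comp' := comp.map (fun c => if c = rx then ry else c)
          loopB danger rest comp' (mkPairsB comp' danger) (ans ++ ["Yes"])
        else
          loopB danger rest comp pairs (ans ++ ["Yes"])

def avoidExlosion_alt (mix : List (Int × Int)) (n : Int) (danger : List (Int × Int)) (m : Int) : List String :=
  let comp := PySem.List.pyRange 0 (n + 1) 1
  loopB danger mix comp (mkPairsB comp danger) []

-- ===== PRECONDITION & SPEC =====
-- Pre_ is the problem's well-formed domain: n ≥ 0 and every mix/danger endpoint a valid
-- (possibly negative, Python-style) index of the (n+1)-element parent array. Outside it A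
-- raises IndexError, except that A never reads danger entries after an empty mix or after
-- the first matching danger pair, so on those inputs A can still return while B's eager
-- validation of danger raises.
def Pre_avoidExlosion (mix : List (Int × Int)) (n : Int) (danger : List (Int × Int)) (m : Int) : Prop :=
  0 ≤ n ∧ (∀ p ∈ mix, -(n + 1) ≤ p.1 ∧ p.1 ≤ n ∧ -(n + 1) ≤ p.2 ∧ p.2 ≤ n)
        ∧ (∀ p ∈ danger, -(n + 1) ≤ p.1 ∧ p.1 ≤ n ∧ -(n + 1) ≤ p.2 ∧ p.2 ≤ n)
instance (mix : List (Int × Int)) (n : Int) (danger : List (Int × Int)) (m : Int) : Decidable (Pre_avoidExlosion mix n danger m) := by unfold Pre_avoidExlosion; infer_instance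

def pvWitness_avoidExlosion : (List (Int × Int)) × Int × (List (Int × Int)) × Int := ([(1, 2), (0, 1)], 2, [(0, 1)], 1)

def Spec_avoidExlosion (mix : List (Int × Int)) (n : Int) (danger : List (Int × Int)) (m : Int) (out : List String) : Prop := out = avoidExlosion_alt mix n danger m
instance (mix : List (Int × Int)) (n : Int) (danger : List (Int × Int)) (m : Int) (out : List String) : Decidable (Spec_avoidExlosion mix n danger m out) := by unfold Spec_avoidExlosion; infer_instance

-- ===== CLAIM (what is proved, stated in full; the proofs are below) =====
def Claim_equal_avoidExlosion : Prop := ∀ (mix : List (Int × Int)) (n : Int) (danger : List (Int × Int)) (m : Int), Dom_avoidExlosion mix n danger m → Pre_avoidExlosion mix n danger m → Spec_avoidExlosion mix n danger m (avoidExlosion mix n danger m)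

-- ===== LEMMAS AND PROOFS =====

-- one parent-following step
def stp (arr : List Int) (j : Int) : Int := pyG arr j

-- r is a root of the parent array
def IsRoot (arr : List Int) (r : Int) : Prop := pyG arr r = r

-- number of non-root cells
def nrCount (arr : List Int) : Nat :=
  (List.range arr.length).countP (fun (j : Nat) => !(pyG arr (j : Int) == ((j : Nat) : Int)))

-- forest invariant of A's parent array
def GoodArr (arr : List Int) : Prop :=
  (∀ a ∈ arr, 0 ≤ a ∧ a < (arr.length : Int)) ∧
  nrCount arr < arr.length ∧
  ∀ i : Int, 0 ≤ i → i < (arr.length : Int) →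
    ∃ k ≤ nrCount arr, IsRoot arr ((stp arr)^[k] i)

-- B's comp table tabulates A's find on every valid (possibly negative) index
def CompInv (arr comp : List Int) : Prop :=
  comp.length = arr.length ∧
  ∀ i : Int, -(arr.length : Int) ≤ i → i < (arr.length : Int) →
    pyG comp i = findA arr arr.length i

theorem findA_step (arr : List Int) (f : Nat) (i : Int) (h : pyG arr i ≠ i) :
    findA arr (f + 1) i = findA arr f (pyG arr i) := by
  simp only [findA]
  rw [if_pos (fun hh => h hh.symm)]

theorem findA_of_iter_root (arr : List Int) :
    ∀ (k f : Nat) (i : Int), k ≤ f → IsRoot arr ((stp arr)^[k] i) →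
      findA arr f i = (stp arr)^[k] i := by
  intro k
  induction k with
  | zero =>
    intro f i _ hroot
    simp only [Function.iterate_zero, id] at hroot ⊢
    cases f with
    | zero => rfl
    | succ f' => simp [findA, IsRoot] at hroot ⊢; simp [hroot]
  | succ k ih =>
    intro f i hk hroot
    by_cases hi : pyG arr i = i
    · have hfix : ∀ j : Nat, (stp arr)^[j] i = i := fun j => Function.iterate_fixed hi j
      rw [hfix] at hroot ⊢
      cases f with
      | zero => rfl
      | succ f' => simp [findA, hi]
    · cases f with
      | zero => omega
      | succ f' =>
        have hstep : findA arr (f' + 1) i = findA arr f' (pyG arr i) := by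
          simp only [findA]
          rw [if_pos (by exact fun h => hi h.symm)]
        rw [hstep, Function.iterate_succ_apply] at *
        exact ih f' (stp arr i) (by omega) hroot

theorem findA_fix (arr : List Int) (f : Nat) (r : Int) (h : IsRoot arr r) :
    findA arr f r = r := by
  have := findA_of_iter_root arr 0 f r (Nat.zero_le f) (by simpa using h)
  simpa using this

theorem iter_mem_range (arr : List Int) (hv : ∀ a ∈ arr, 0 ≤ a ∧ a < (arr.length : Int)) :
    ∀ (k : Nat) (i : Int), 0 ≤ i → i < (arr.length : Int) →
      0 ≤ (stp arr)^[k] i ∧ (stp arr)^[k] i < (arr.length : Int) := by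
  intro k
  induction k with
  | zero => intro i h0 h1; simpa using ⟨h0, h1⟩
  | succ k ih =>
    intro i h0 h1
    rw [Function.iterate_succ_apply]
    refine ih (stp arr i) ?_ ?_
    all_goals
      have hmem : stp arr i ∈ arr := by
        have h : PySem.Raise.InRange arr.length i := ⟨by omega, by omega⟩
        exact PySem.List.pyGetD_mem arr 0 h
      have := hv _ hmem
      omega

theorem find_good (arr : List Int) (hg : GoodArr arr) (i : Int) (h0 : 0 ≤ i)
    (h1 : i < (arr.length : Int)) :
    IsRoot arr (findA arr arr.length i) ∧ 0 ≤ findA arr arr.length i ∧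
      findA arr arr.length i < (arr.length : Int) := by
  obtain ⟨hv, hnr, hterm⟩ := hg
  obtain ⟨k, hk, hroot⟩ := hterm i h0 h1
  have hfind := findA_of_iter_root arr k arr.length i (by omega) hroot
  rw [hfind]
  have := iter_mem_range arr hv k i h0 h1
  exact ⟨hroot, this.1, this.2⟩

theorem find_neg (arr : List Int) (hg : GoodArr arr) (x : Int)
    (h0 : -(arr.length : Int) ≤ x) (h1 : x < 0) :
    findA arr arr.length x = findA arr arr.length (x + arr.length) := by
  obtain ⟨hv, hnr, hterm⟩ := hg
  have hlen : 0 < arr.length := by omega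
  have hx : pyG arr x = pyG arr (x + arr.length) := by
    have hk : (-x).toNat ≤ arr.length := by omega
    have hk0 : 0 < (-x).toNat := by omega
    have e1 : pyG arr x = arr[arr.length - (-x).toNat] := by
      unfold pyG
      have hxk : x = -(((-x).toNat : Nat) : Int) := by omega
      conv_lhs => rw [hxk]
      exact PySem.List.pyGetD_neg_natCast arr (-x).toNat 0 hk0 hk
    have e2 : pyG arr (x + arr.length) = arr[arr.length - (-x).toNat] := by
      unfold pyG
      rw [PySem.List.pyGetD_eq_getElem arr 0 (by omega) (by omega)]
      congr 1
      omega
    rw [e1, e2]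
  have hval : 0 ≤ pyG arr (x + arr.length) ∧ pyG arr (x + arr.length) < (arr.length : Int) := by
    have h : PySem.Raise.InRange arr.length (x + arr.length) := ⟨by omega, by omega⟩
    exact hv _ (PySem.List.pyGetD_mem arr 0 h)
  obtain ⟨f, hf⟩ : ∃ f, arr.length = f + 1 := ⟨arr.length - 1, by omega⟩
  have hLne : pyG arr x ≠ x := by omega
  have hL : findA arr arr.length x = findA arr f (pyG arr x) := by
    have h := findA_step arr f x hLne
    rw [← hf] at h
    exact h
  by_cases hroot : pyG arr (x + arr.length) = x + arr.length
  · rw [hL, hx, hroot]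
    rw [findA_fix arr f _ hroot, findA_fix arr arr.length _ hroot]
  · have hR : findA arr arr.length (x + arr.length) = findA arr f (pyG arr (x + arr.length)) := by
      have h := findA_step arr f (x + (arr.length : Int)) (fun h => hroot h)
      rw [← hf] at h
      exact h
    rw [hL, hR, hx]

theorem pyG_neg (l : List Int) (j : Int) (h0 : -(l.length : Int) ≤ j) (h1 : j < 0) :
    pyG l j = pyG l (j + l.length) := by
  have hk : (-j).toNat ≤ l.length := by omega
  have hk0 : 0 < (-j).toNat := by omega
  have e1 := PySem.List.pyGetD_neg_natCast l (-j).toNat 0 hk0 hk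
  have e2 := PySem.List.pyGetD_eq_getElem l (i := j + l.length) 0 (by omega) (by omega)
  have hxk : j = -(((-j).toNat : Nat) : Int) := by omega
  unfold pyG
  conv_lhs => rw [hxk]
  rw [e1, e2]
  have hidx : l.length - (-j).toNat = (j + (l.length : Int)).toNat := by omega
  simp only [hidx]

theorem pyG_set (arr : List Int) (rx ry : Int) (h0 : 0 ≤ rx) (h1 : rx < (arr.length : Int))
    (j : Int) (hj0 : 0 ≤ j) (hj1 : j < (arr.length : Int)) :
    pyG (PySem.List.pySetD arr rx ry) j = if j = rx then ry else pyG arr j := by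
  unfold pyG
  have h := PySem.List.pyGetD_pySetD_natCast arr rx.toNat j.toNat ry 0 (by omega)
  have hcast1 : ((rx.toNat : Nat) : Int) = rx := by omega
  have hcast2 : ((j.toNat : Nat) : Int) = j := by omega
  rw [hcast1, hcast2] at h
  rw [h]
  by_cases hjr : j = rx
  · rw [if_pos (by omega), if_pos hjr]
  · rw [if_neg (by omega), if_neg hjr]

theorem countP_update {l : List Nat} {p p' : Nat → Bool} {m : Nat} (hl : l.Nodup) (hm : m ∈ l)
    (h : ∀ j ∈ l, j ≠ m → p' j = p j) (hpm : p m = false) (hpm' : p' m = true) :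
    l.countP p' = l.countP p + 1 := by
  induction l with
  | nil => cases hm
  | cons a l ih =>
    rcases List.nodup_cons.mp hl with ⟨ha, hl'⟩
    by_cases ham : a = m
    · subst ham
      rw [List.countP_cons_of_pos hpm', List.countP_cons_of_neg (by simp [hpm])]
      have : l.countP p' = l.countP p := by
        apply List.countP_congr
        intro j hj
        rw [h j (by simp [hj]) (fun hjm => ha (hjm ▸ hj))]
      omega
    · have hm' : m ∈ l := by
        rcases List.mem_cons.mp hm with h' | hm''
        · exact absurd h'.symm ham
        · exact hm''
      have hih := ih hl' hm' (fun j hj hjm => h j (by simp [hj]) hjm)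
      have hpa : p' a = p a := h a (by simp) ham
      by_cases hpa' : p a = true
      · rw [List.countP_cons_of_pos (by rw [hpa]; exact hpa'), List.countP_cons_of_pos hpa']
        omega
      · rw [List.countP_cons_of_neg (by simp [hpa, hpa']), List.countP_cons_of_neg (by simp [hpa'])]
        omega

theorem countP_lt_of_false {l : List Nat} {p : Nat → Bool} {m : Nat} (hm : m ∈ l)
    (hpm : p m = false) : l.countP p < l.length := by
  induction l with
  | nil => cases hm
  | cons a l ih =>
    by_cases ham : a = m
    · subst ham
      rw [List.countP_cons_of_neg (by simp [hpm])]
      have := List.countP_le_length (p := p) (l := l)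
      simp only [List.length_cons]
      omega
    · have hm' : m ∈ l := by
        rcases List.mem_cons.mp hm with h' | hm''
        · exact absurd h'.symm ham
        · exact hm''
      have := ih hm'
      have hc := List.countP_cons (p := p) (a := a) (l := l)
      simp only [List.length_cons]
      split_ifs at hc <;> omega

-- the whole update package: after arr[rx] = ry, roots are relabelled rx ↦ ry
theorem union_step (arr : List Int) (rx ry : Int) (hg : GoodArr arr)
    (hrx : IsRoot arr rx) (hry : IsRoot arr ry)
    (hrx0 : 0 ≤ rx) (hrx1 : rx < (arr.length : Int))
    (hry0 : 0 ≤ ry) (hry1 : ry < (arr.length : Int)) (hne : rx ≠ ry) :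
    GoodArr (PySem.List.pySetD arr rx ry) ∧
    ∀ i : Int, -(arr.length : Int) ≤ i → i < (arr.length : Int) →
      findA (PySem.List.pySetD arr rx ry) (PySem.List.pySetD arr rx ry).length i =
        (fun r => if r = rx then ry else r) (findA arr arr.length i) := by
  have hrx' : pyG arr rx = rx := hrx
  have hry' : pyG arr ry = ry := hry
  set arr' := PySem.List.pySetD arr rx ry with harr'
  have hlen' : arr'.length = arr.length := PySem.List.length_pySetD arr rx ry
  obtain ⟨hv, hnr, hterm⟩ := hg
  have hstp : ∀ j : Int, 0 ≤ j → j < (arr.length : Int) →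
      stp arr' j = if j = rx then ry else stp arr j := by
    intro j hj0 hj1
    exact pyG_set arr rx ry hrx0 hrx1 j hj0 hj1
  -- non-root count increases by exactly one
  have hcrx : ((rx.toNat : Nat) : Int) = rx := Int.toNat_of_nonneg hrx0
  have hcry : ((ry.toNat : Nat) : Int) = ry := Int.toNat_of_nonneg hry0
  have hnr' : nrCount arr' = nrCount arr + 1 := by
    unfold nrCount
    rw [hlen']
    refine countP_update (m := rx.toNat) List.nodup_range (List.mem_range.mpr (by omega)) ?_ ?_ ?_
    · intro j hj hjne
      have hj' := List.mem_range.mp hj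
      have h := hstp (j : Int) (by omega) (by omega)
      rw [if_neg (by omega)] at h
      simp only [stp] at h
      simp only [pyG] at h ⊢
      rw [h]
    · simp only [hcrx]
      simp [hrx']
    · have h := hstp rx hrx0 hrx1
      rw [if_pos rfl] at h
      simp only [stp] at h
      simp only [hcrx]
      simp only [pyG] at h ⊢
      rw [h]
      simp
      omega
  have hnrlt : nrCount arr' < arr.length := by
    have hcount := countP_lt_of_false (l := List.range arr.length) (m := ry.toNat)
      (p := fun (j : Nat) => !(pyG arr' (j : Int) == ((j : Nat) : Int)))
      (List.mem_range.mpr (by omega)) ?_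
    · unfold nrCount
      rw [hlen']
      simpa using hcount
    · have h := hstp ry hry0 hry1
      rw [if_neg (fun hh => hne hh.symm)] at h
      simp only [stp] at h
      simp only [hcry]
      have hry2 : PySem.List.pyGetD arr ry 0 = ry := hry'
      simp only [pyG] at h ⊢
      rw [h, hry2]
      simp
  -- roots transfer with relabelling rx ↦ ry
  have trans : ∀ (k : Nat) (i : Int), 0 ≤ i → i < (arr.length : Int) →
      IsRoot arr ((stp arr)^[k] i) →
      ∃ k' ≤ k + 1, (stp arr')^[k'] i = (if (stp arr)^[k] i = rx then ry else (stp arr)^[k] i) ∧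
        IsRoot arr' ((stp arr')^[k'] i) := by
    intro k
    induction k with
    | zero =>
      intro i h0 h1 hroot
      simp only [Function.iterate_zero, id] at hroot ⊢
      by_cases hir : i = rx
      · refine ⟨1, by omega, ?_, ?_⟩
        · simp only [Function.iterate_one]
          rw [hstp i h0 h1, if_pos hir, if_pos hir]
        · simp only [Function.iterate_one]
          rw [hstp i h0 h1, if_pos hir]
          show pyG arr' ry = ry
          have := hstp ry hry0 hry1
          simp only [stp] at this
          rw [this, if_neg (fun h => hne h.symm)]
          exact hry'
      · refine ⟨0, by omega, ?_, ?_⟩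
        · simp [hir]
        · simp only [Function.iterate_zero, id]
          show pyG arr' i = i
          have := hstp i h0 h1
          simp only [stp] at this
          rw [this, if_neg hir]
          exact hroot
    | succ k ih =>
      intro i h0 h1 hroot
      by_cases hi : pyG arr i = i
      · have hfix : ∀ j : Nat, (stp arr)^[j] i = i := fun j => Function.iterate_fixed hi j
        rw [hfix] at hroot ⊢
        by_cases hir : i = rx
        · refine ⟨1, by omega, ?_, ?_⟩
          · simp only [Function.iterate_one]
            rw [hstp i h0 h1, if_pos hir, if_pos hir]
          · simp only [Function.iterate_one]
            rw [hstp i h0 h1, if_pos hir]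
            show pyG arr' ry = ry
            have := hstp ry hry0 hry1
            simp only [stp] at this
            rw [this, if_neg (fun h => hne h.symm)]
            exact hry'
        · refine ⟨0, by omega, ?_, ?_⟩
          · simp [hir]
          · simp only [Function.iterate_zero, id]
            show pyG arr' i = i
            have := hstp i h0 h1
            simp only [stp] at this
            rw [this, if_neg hir]
            exact hroot
      · have hine : i ≠ rx := fun h => hi (h ▸ hrx')
        have hmem : stp arr i ∈ arr := by
          have h : PySem.Raise.InRange arr.length i := ⟨by omega, by omega⟩
          exact PySem.List.pyGetD_mem arr 0 h
        have hrange := hv _ hmem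
        rw [Function.iterate_succ_apply] at hroot ⊢
        obtain ⟨k', hk', heq, hr⟩ := ih (stp arr i) hrange.1 hrange.2 hroot
        refine ⟨k' + 1, by omega, ?_, ?_⟩
        · rw [Function.iterate_succ_apply]
          have : stp arr' i = stp arr i := by rw [hstp i h0 h1, if_neg hine]
          rw [this]
          exact heq
        · rw [Function.iterate_succ_apply]
          have : stp arr' i = stp arr i := by rw [hstp i h0 h1, if_neg hine]
          rw [this]
          exact hr
  have hgood' : GoodArr arr' := by
    refine ⟨?_, by omega, ?_⟩
    · intro a ha
      rw [hlen']
      rw [harr', PySem.List.pySetD_of_nonneg arr ry hrx0] at ha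
      rcases List.mem_or_eq_of_mem_set ha with h | h
      · exact hv a h
      · omega
    · intro i h0 h1
      rw [hlen'] at h1
      obtain ⟨k, hk, hroot⟩ := hterm i h0 h1
      obtain ⟨k', hk', _, hr⟩ := trans k i h0 h1 hroot
      exact ⟨k', by omega, hr⟩
  refine ⟨hgood', ?_⟩
  have main : ∀ i : Int, 0 ≤ i → i < (arr.length : Int) →
      findA arr' arr'.length i = (fun r => if r = rx then ry else r) (findA arr arr.length i) := by
    intro i h0 h1
    obtain ⟨k, hk, hroot⟩ := hterm i h0 h1
    have hold := findA_of_iter_root arr k arr.length i (by omega) hroot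
    obtain ⟨k', hk', heq, hr⟩ := trans k i h0 h1 hroot
    have hnew := findA_of_iter_root arr' k' arr'.length i (by omega) hr
    rw [hnew, heq, hold]
  intro i h0 h1
  by_cases hineg : 0 ≤ i
  · exact main i hineg h1
  · have hneg := find_neg arr ⟨hv, hnr, hterm⟩ i h0 (by omega)
    have hneg' := find_neg arr' hgood' i (by rw [hlen']; omega) (by omega)
    rw [hneg, hneg']
    rw [show ((arr'.length : Nat) : Int) = ((arr.length : Nat) : Int) by rw [hlen']]
    exact main (i + arr.length) (by omega) (by omega)

theorem checkA_iff (arr : List Int) (rx ry : Int) (danger : List (Int × Int)) :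
    checkA arr rx ry danger = true ↔
      ∃ pq ∈ danger,
        (rx = findA arr arr.length pq.1 ∧ ry = findA arr arr.length pq.2) ∨
        (rx = findA arr arr.length pq.2 ∧ ry = findA arr arr.length pq.1) := by
  induction danger with
  | nil => simp [checkA]
  | cons pq rest ih =>
    obtain ⟨p, q⟩ := pq
    simp only [checkA]
    split_ifs with h
    · constructor
      · intro _
        exact ⟨(p, q), List.mem_cons_self .., h⟩
      · intro _; rfl
    · rw [ih]
      constructor
      · rintro ⟨pq', hmem, hcond⟩
        exact ⟨pq', List.mem_cons_of_mem _ hmem, hcond⟩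
      · rintro ⟨pq', hmem, hcond⟩
        rcases List.mem_cons.mp hmem with rfl | hmem'
        · exact absurd hcond h
        · exact ⟨pq', hmem', hcond⟩

theorem mkPairsB_mem (comp : List Int) (danger : List (Int × Int)) (v : Int × Int) :
    PySem.Set.contains (mkPairsB comp danger) v = true ↔
      ∃ pq ∈ danger, (pyG comp pq.1, pyG comp pq.2) = v := by
  unfold mkPairsB
  rw [show (PySem.Set.contains (PySem.Set.ofList (danger.map (fun pq => (pyG comp pq.1, pyG comp pq.2)))) v = true) ↔
      v ∈ danger.map (fun pq => (pyG comp pq.1, pyG comp pq.2)) by simp [PySem.Set.contains]]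
  rw [List.mem_map]

theorem pyG_map (l : List Int) (f : Int → Int) (i : Int) (h0 : -(l.length : Int) ≤ i)
    (h1 : i < (l.length : Int)) : pyG (l.map f) i = f (pyG l i) := by
  by_cases hi : 0 ≤ i
  · unfold pyG
    rw [PySem.List.pyGetD_eq_getElem _ 0 hi (by simpa using h1),
        PySem.List.pyGetD_eq_getElem _ 0 hi h1]
    simp
  · unfold pyG
    have hk0 : 0 < (-i).toNat := by omega
    have hk : (-i).toNat ≤ l.length := by omega
    have hxk : i = -(((-i).toNat : Nat) : Int) := by omega
    conv_lhs => rw [hxk]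
    conv_rhs => rw [hxk]
    rw [PySem.List.pyGetD_neg_natCast _ (-i).toNat 0 hk0 (by simpa using hk),
        PySem.List.pyGetD_neg_natCast _ (-i).toNat 0 hk0 hk]
    simp

theorem loop_eq (danger : List (Int × Int)) :
    ∀ (mixR : List (Int × Int)) (arr comp : List Int) (ans : List String),
      GoodArr arr → CompInv arr comp →
      (∀ p ∈ mixR, -(arr.length : Int) ≤ p.1 ∧ p.1 < (arr.length : Int) ∧
                   -(arr.length : Int) ≤ p.2 ∧ p.2 < (arr.length : Int)) →
      (∀ p ∈ danger, -(arr.length : Int) ≤ p.1 ∧ p.1 < (arr.length : Int) ∧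
                   -(arr.length : Int) ≤ p.2 ∧ p.2 < (arr.length : Int)) →
      loopA danger mixR arr ans = loopB danger mixR comp (mkPairsB comp danger) ans := by
  intro mixR
  induction mixR with
  | nil => intro arr comp ans _ _ _ _; rfl
  | cons xy rest ih =>
    obtain ⟨x, y⟩ := xy
    intro arr comp ans hg hc hmix hdanger
    obtain ⟨hclen, hcomp⟩ := hc
    have hb := hmix (x, y) (List.mem_cons_self ..)
    have hrest : ∀ p ∈ rest, -(arr.length : Int) ≤ p.1 ∧ p.1 < (arr.length : Int) ∧
        -(arr.length : Int) ≤ p.2 ∧ p.2 < (arr.length : Int) :=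
      fun p hp => hmix p (List.mem_cons_of_mem _ hp)
    have hx : pyG comp x = findA arr arr.length x := hcomp x hb.1 hb.2.1
    have hy : pyG comp y = findA arr arr.length y := hcomp y hb.2.2.1 hb.2.2.2
    have hroot : ∀ z : Int, -(arr.length : Int) ≤ z → z < (arr.length : Int) →
        IsRoot arr (findA arr arr.length z) ∧ 0 ≤ findA arr arr.length z ∧
          findA arr arr.length z < (arr.length : Int) := by
      intro z h0 h1
      by_cases hz : 0 ≤ z
      · exact find_good arr hg z hz h1
      · rw [find_neg arr hg z h0 (by omega)]
        exact find_good arr hg _ (by omega) (by omega)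
    have hdec : checkA arr (findA arr arr.length x) (findA arr arr.length y) danger =
        (PySem.Set.contains (mkPairsB comp danger) (findA arr arr.length x, findA arr arr.length y) ||
         PySem.Set.contains (mkPairsB comp danger) (findA arr arr.length y, findA arr arr.length x)) := by
      apply Bool.coe_iff_coe.mp
      rw [checkA_iff, Bool.or_eq_true, mkPairsB_mem, mkPairsB_mem]
      constructor
      · rintro ⟨pq, hmem, hcond⟩
        have hd := hdanger pq hmem
        have hp := hcomp pq.1 hd.1 hd.2.1
        have hq := hcomp pq.2 hd.2.2.1 hd.2.2.2
        rcases hcond with ⟨h1, h2⟩ | ⟨h1, h2⟩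
        · exact Or.inl ⟨pq, hmem, by rw [hp, hq, ← h1, ← h2]⟩
        · exact Or.inr ⟨pq, hmem, by rw [hp, hq, ← h1, ← h2]⟩
      · rintro (⟨pq, hmem, hcond⟩ | ⟨pq, hmem, hcond⟩)
        · have hd := hdanger pq hmem
          have hp := hcomp pq.1 hd.1 hd.2.1
          have hq := hcomp pq.2 hd.2.2.1 hd.2.2.2
          rw [hp, hq] at hcond
          injection hcond with h1 h2
          exact ⟨pq, hmem, Or.inl ⟨h1.symm, h2.symm⟩⟩
        · have hd := hdanger pq hmem
          have hp := hcomp pq.1 hd.1 hd.2.1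
          have hq := hcomp pq.2 hd.2.2.1 hd.2.2.2
          rw [hp, hq] at hcond
          injection hcond with h1 h2
          exact ⟨pq, hmem, Or.inr ⟨h2.symm, h1.symm⟩⟩
    simp only [loopA, loopB]
    rw [hx, hy, hdec]
    cases hcond : (PySem.Set.contains (mkPairsB comp danger) (findA arr arr.length x, findA arr arr.length y) ||
         PySem.Set.contains (mkPairsB comp danger) (findA arr arr.length y, findA arr arr.length x)) with
    | true =>
      rw [if_pos rfl]
      exact ih arr comp (ans ++ ["No"]) hg ⟨hclen, hcomp⟩ hrest hdanger
    | false =>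
      rw [if_neg (by simp)]
      obtain ⟨hrootx, hx0, hx1⟩ := hroot x hb.1 hb.2.1
      obtain ⟨hrooty, hy0, hy1⟩ := hroot y hb.2.2.1 hb.2.2.2
      by_cases hxy : findA arr arr.length x = findA arr arr.length y
      · have hun : unionA arr (findA arr arr.length x) (findA arr arr.length y) = arr := by
          unfold unionA
          rw [findA_fix _ _ _ hrootx, findA_fix _ _ _ hrooty]
          rw [if_neg (by simp [hxy])]
        rw [hun, if_neg (show ¬(findA arr arr.length x ≠ findA arr arr.length y) from fun h => h hxy)]
        exact ih arr comp (ans ++ ["Yes"]) hg ⟨hclen, hcomp⟩ hrest hdanger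
      · have hun : unionA arr (findA arr arr.length x) (findA arr arr.length y) =
            PySem.List.pySetD arr (findA arr arr.length x) (findA arr arr.length y) := by
          unfold unionA
          rw [findA_fix _ _ _ hrootx, findA_fix _ _ _ hrooty]
          rw [if_pos hxy]
        have hstep := union_step arr _ _ hg hrootx hrooty hx0 hx1 hy0 hy1 hxy
        have hlenA' : (PySem.List.pySetD arr (findA arr arr.length x) (findA arr arr.length y)).length = arr.length :=
          PySem.List.length_pySetD ..
        have hmaplen : (comp.map (fun c => if c = findA arr arr.length x then findA arr arr.length y else c)).length = comp.length :=
          List.length_map ..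
        have hcomp' : CompInv (PySem.List.pySetD arr (findA arr arr.length x) (findA arr arr.length y))
            (comp.map (fun c => if c = findA arr arr.length x then findA arr arr.length y else c)) := by
          refine ⟨by rw [hmaplen, hclen, hlenA'], ?_⟩
          intro i h0 h1
          rw [hlenA'] at h0 h1
          rw [pyG_map comp _ i (by rw [hclen]; exact h0) (by rw [hclen]; exact h1)]
          rw [hcomp i h0 h1]
          exact (hstep.2 i h0 h1).symm
        rw [hun, if_pos hxy]
        exact ih _ _ (ans ++ ["Yes"]) hstep.1 hcomp'
          (by intro p hp; rw [hlenA']; exact hrest p hp)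
          (by intro p hp; rw [hlenA']; exact hdanger p hp)

theorem pyG_init (n : Int) (hn : 0 ≤ n) (i : Int) (h0 : 0 ≤ i) (h1 : i < n + 1) :
    pyG (PySem.List.pyRange 0 (n + 1) 1) i = i := by
  unfold pyG
  rw [PySem.List.pyGetD_eq_getElem _ 0 h0
    (by rw [PySem.List.length_pyRange_one]; omega)]
  rw [PySem.List.getElem_pyRange_one]
  omega

theorem init_good (n : Int) (hn : 0 ≤ n) : GoodArr (PySem.List.pyRange 0 (n + 1) 1) := by
  have hlen : (PySem.List.pyRange 0 (n + 1) 1).length = (n + 1).toNat :=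
    (by rw [PySem.List.length_pyRange_one]; congr 1; omega)
  have hnr : nrCount (PySem.List.pyRange 0 (n + 1) 1) = 0 := by
    unfold nrCount
    rw [List.countP_eq_zero]
    intro j hj
    have hj' := List.mem_range.mp hj
    rw [hlen] at hj'
    have := pyG_init n hn (j : Int) (by omega) (by omega)
    simp [this]
  refine ⟨?_, ?_, ?_⟩
  · intro a ha
    rw [PySem.List.mem_pyRange_one] at ha
    rw [hlen]
    omega
  · omega
  · intro i h0 h1
    refine ⟨0, by omega, ?_⟩
    simp only [Function.iterate_zero, id]
    show pyG _ i = i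
    rw [hlen] at h1
    exact pyG_init n hn i h0 (by omega)

theorem init_comp (n : Int) (hn : 0 ≤ n) :
    CompInv (PySem.List.pyRange 0 (n + 1) 1) (PySem.List.pyRange 0 (n + 1) 1) := by
  have hg := init_good n hn
  have hlen : (PySem.List.pyRange 0 (n + 1) 1).length = (n + 1).toNat :=
    (by rw [PySem.List.length_pyRange_one]; congr 1; omega)
  refine ⟨rfl, ?_⟩
  intro i h0 h1
  have key : ∀ j : Int, 0 ≤ j → j < ((PySem.List.pyRange 0 (n + 1) 1).length : Int) →
      pyG (PySem.List.pyRange 0 (n + 1) 1) j = findA (PySem.List.pyRange 0 (n + 1) 1)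
        (PySem.List.pyRange 0 (n + 1) 1).length j := by
    intro j hj0 hj1
    rw [hlen] at hj1
    have hroot : pyG (PySem.List.pyRange 0 (n + 1) 1) j = j := pyG_init n hn j hj0 (by omega)
    rw [findA_fix _ _ _ hroot, hroot]
  by_cases hi : 0 ≤ i
  · exact key i hi h1
  · rw [pyG_neg _ i h0 (by omega), find_neg _ hg i h0 (by omega)]
    exact key _ (by omega) (by omega)

theorem len_init (n : Int) (hn : 0 ≤ n) :
    ((PySem.List.pyRange 0 (n + 1) 1).length : Int) = n + 1 := by
  rw [PySem.List.length_pyRange_one]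
  omega

-- ===== VERDICT (by name: the statement is the Claim_ definition above) =====
theorem avoidExlosion_spec : Claim_equal_avoidExlosion := by
  intro mix n danger m _ hpre
  obtain ⟨hn, hmix, hdanger⟩ := hpre
  unfold Spec_avoidExlosion avoidExlosion avoidExlosion_alt
  have hlen := len_init n hn
  exact loop_eq danger mix _ _ [] (init_good n hn) (init_comp n hn)
    (by intro p hp; have := hmix p hp; rw [hlen]; omega)
    (by intro p hp; have := hdanger p hp; rw [hlen]; omega)
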